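-- pv_equiv track=rewrite | github.com/onyuki/1400-zadach-po-programmirivaniu | 7.1-7.46.py | prefix_sums_terminated_by_zero
-- ===== SOURCE A (Python) =====
-- from typing import List, Tuple, Iterable
-- from typing import Iterable, List, Optional, Tuple
-- from typing import List, Tuple
--
-- def prefix_sums_terminated_by_zero(seq: List[int]) -> List[int]:
--     if not seq:
--         raise ValueError("Пустая последовательность")
--     try:
--         idx = seq.index(0)
--         data = seq[:idx]
--     except ValueError:
--         data = seq
--     res = []
--     acc = 0
--     for x in data:
--         acc += x
--         res.append(acc)
--     return res
-- ===== SOURCE B (Python) =====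
-- from typing import List
--
-- def prefix_sums_terminated_by_zero(seq: List[int]) -> List[int]:
--     if not seq:
--         raise ValueError("Пустая последовательность")
--     # pass 1: only measure — total and length of the part before the first zero
--     total = 0
--     n = 0
--     for x in seq:
--         if x == 0:
--             break
--         total += x
--         n += 1
--     # pass 2: build the answer back-to-front by subtraction from the total
--     res = []
--     i = n
--     while i > 0:
--         i -= 1
--         res.append(total)
--         total -= seq[i]
--     res.reverse()
--     return res
-- ===== Notes on version B (the rewrite author's own statement) =====
-- stated objective: alternative
-- what changed: B never builds the result with a running forward accumulator: one pass measures only the total and length of the zero-free prefix, then the output is constructed back-to-front by subtracting elements from the total and finally reversed, instead of A's index(0)+slice followed by an append-per-step accumulation loop.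
import Mathlib
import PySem

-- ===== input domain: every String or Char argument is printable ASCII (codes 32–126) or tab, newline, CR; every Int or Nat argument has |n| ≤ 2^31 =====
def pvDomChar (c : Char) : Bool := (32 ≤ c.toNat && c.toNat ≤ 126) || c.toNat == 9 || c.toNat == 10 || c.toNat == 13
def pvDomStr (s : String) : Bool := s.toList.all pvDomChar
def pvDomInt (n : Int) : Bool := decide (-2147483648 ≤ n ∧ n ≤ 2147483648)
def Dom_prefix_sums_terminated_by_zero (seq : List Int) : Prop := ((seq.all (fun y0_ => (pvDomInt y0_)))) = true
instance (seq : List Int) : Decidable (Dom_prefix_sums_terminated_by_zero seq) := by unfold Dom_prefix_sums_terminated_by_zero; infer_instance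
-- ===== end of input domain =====

-- B builds the result back-to-front by subtraction from the prefix total (measured in one pass),
-- instead of A's index(0)+slice followed by a forward accumulation loop; an 'alternative' decomposition, not faster.


-- ===== PORT A =====
-- seq.index(0) → PySem.List.index?; seq[:idx] → PySem.List.slice; the loop appends acc to res.
def prefix_sums_terminated_by_zero (seq : List Int) : List Int :=
  let data : List Int :=
    match PySem.List.index? seq 0 with
    | some idx => PySem.List.slice seq none (some (idx : Int))
    | none => seq
  (data.foldl (fun (st : List Int × Int) x => (st.1 ++ [st.2 + x], st.2 + x)) ([], 0)).1

-- ===== PORT B =====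
-- Source B pass 1: the for-loop with break, carrying (total, n)
def psAltMeasure (total : Int) (n : Nat) : List Int → Int × Nat
  | [] => (total, n)
  | x :: xs => if x = 0 then (total, n) else psAltMeasure (total + x) (n + 1) xs

-- Source B pass 2: the while-loop over i, appending total and subtracting seq[i];
-- seq[i] is ported as seq.getD i 0, exact here since the loop keeps 0 ≤ i < n ≤ len(seq)
def psAltBack (seq : List Int) : Nat → Int → List Int → List Int
  | 0, _, res => res
  | i + 1, total, res => psAltBack seq i (total - seq.getD i 0) (res ++ [total])

def prefix_sums_terminated_by_zero_alt (seq : List Int) : List Int :=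
  let (total, n) := psAltMeasure 0 0 seq
  (psAltBack seq n total []).reverse

-- ===== PRECONDITION & SPEC =====
-- Pre_ excludes only the empty list, on which both A and B raise ValueError.
def Pre_prefix_sums_terminated_by_zero (seq : List Int) : Prop := seq ≠ []
instance (seq : List Int) : Decidable (Pre_prefix_sums_terminated_by_zero seq) := by unfold Pre_prefix_sums_terminated_by_zero; infer_instance
def pvWitness_prefix_sums_terminated_by_zero : List Int := [1, 2, 0, 5]

def Spec_prefix_sums_terminated_by_zero (seq : List Int) (out : List Int) : Prop := out = prefix_sums_terminated_by_zero_alt seq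
instance (seq : List Int) (out : List Int) : Decidable (Spec_prefix_sums_terminated_by_zero seq out) := by unfold Spec_prefix_sums_terminated_by_zero; infer_instance

-- ===== CLAIM (what is proved, stated in full; the proofs are below) =====
def Claim_equal_prefix_sums_terminated_by_zero : Prop := ∀ (seq : List Int), Dom_prefix_sums_terminated_by_zero seq → Pre_prefix_sums_terminated_by_zero seq → Spec_prefix_sums_terminated_by_zero seq (prefix_sums_terminated_by_zero seq)

-- ===== LEMMAS AND PROOFS =====

-- proof-only helper: forward prefix sums from accumulator a
def psG (a : Int) : List Int → List Int
  | [] => []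
  | x :: xs => (a + x) :: psG (a + x) xs

-- A's truncation (index of 0, then slice) is takeWhile (· ≠ 0)
lemma psDataEq (seq : List Int) :
    (match PySem.List.index? seq 0 with
     | some idx => PySem.List.slice seq none (some (idx : Int))
     | none => seq) = seq.takeWhile (fun x => !decide (x = 0)) := by
  induction seq with
  | nil => simp [PySem.List.index?]
  | cons x xs ih =>
    by_cases hx : x = 0
    · subst hx
      rw [PySem.List.index?_cons_self]
      show PySem.List.slice ((0:Int) :: xs) none (some ((0:Nat) : Int)) = _
      rw [PySem.List.slice_to_natCast]
      simp
    · rw [PySem.List.index?_cons_of_ne xs hx]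
      cases h : PySem.List.index? xs 0 with
      | none =>
        rw [h] at ih
        simp only [List.takeWhile_cons, hx, decide_false, Bool.not_false, if_true]
        exact congrArg (x :: ·) ih
      | some k =>
        rw [h] at ih
        have : PySem.List.slice (x :: xs) none (some ((k + 1 : Nat) : Int)) =
            x :: PySem.List.slice xs none (some (k : Int)) := by
          rw [PySem.List.slice_to_natCast, PySem.List.slice_to_natCast]
          simp
        simp only [Option.map_some]
        push_cast
        push_cast at this
        simp only [List.takeWhile_cons, hx, decide_false, Bool.not_false, if_true]
        rw [this]
        exact congrArg (x :: ·) (by simpa using ih)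

-- A's accumulation fold equals psG
lemma psFoldEq (l : List Int) : ∀ (r : List Int) (a : Int),
    (l.foldl (fun (st : List Int × Int) x => (st.1 ++ [st.2 + x], st.2 + x)) (r, a)).1
      = r ++ psG a l := by
  induction l with
  | nil => simp [psG]
  | cons x xs ih => intro r a; simp [List.foldl_cons, ih, psG]

-- prefix sums of a snoc
lemma psG_snoc (l : List Int) (x : Int) : ∀ a, psG a (l ++ [x]) = psG a l ++ [a + l.sum + x] := by
  induction l with
  | nil => intro a; simp [psG]
  | cons y ys ih => intro a; simp [psG, ih, add_assoc]

-- pass 1 measures the zero-free prefix: its sum and length are added to the accumulators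
lemma psMeasureEq (seq : List Int) : ∀ (t : Int) (n : Nat),
    psAltMeasure t n seq =
      (t + (seq.takeWhile (fun x => !decide (x = 0))).sum,
       n + (seq.takeWhile (fun x => !decide (x = 0))).length) := by
  induction seq with
  | nil => intro t n; simp [psAltMeasure]
  | cons x xs ih =>
    intro t n
    by_cases hx : x = 0
    · subst hx; simp [psAltMeasure]
    · simp [psAltMeasure, hx, ih, add_assoc, add_comm, add_left_comm]

-- pass 2 rebuilds the forward prefix sums reversed, walking the data back-to-front
lemma psBackEq (l : List Int) : ∀ (rest res : List Int) (a : Int),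
    psAltBack (l ++ rest) l.length (a + l.sum) res = res ++ (psG a l).reverse := by
  induction l using List.reverseRecOn with
  | nil => intro rest res a; simp [psAltBack, psG]
  | append_singleton l' x ih =>
    intro rest res a
    have hget : (l' ++ [x] ++ rest).getD l'.length 0 = x := by
      rw [List.append_assoc, List.getD_eq_getElem?_getD,
        List.getElem?_append_right (le_refl _)]
      simp
    simp only [List.length_append, List.length_singleton, psAltBack, hget]
    have h1 : a + (l' ++ [x]).sum - x = a + l'.sum := by
      simp only [List.sum_append, List.sum_cons, List.sum_nil, add_zero]; ring
    rw [List.append_assoc, h1, ih ([x] ++ rest) (res ++ [a + (l' ++ [x]).sum]) a]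
    rw [psG_snoc]
    simp [add_assoc]

-- ===== VERDICT (by name: the statement is the Claim_ definition above) =====
theorem prefix_sums_terminated_by_zero_spec : Claim_equal_prefix_sums_terminated_by_zero := by
  intro seq _ _
  unfold Spec_prefix_sums_terminated_by_zero prefix_sums_terminated_by_zero prefix_sums_terminated_by_zero_alt
  rw [psDataEq seq, psFoldEq]
  simp only [psMeasureEq seq 0 0, Int.zero_add, Nat.zero_add]
  set data := seq.takeWhile (fun x => !decide (x = 0)) with hdata
  have hsplit : seq = data ++ seq.dropWhile (fun x => !decide (x = 0)) := by
    rw [hdata, List.takeWhile_append_dropWhile]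
  calc [] ++ psG 0 data
      = psG 0 data := by simp
    _ = (psAltBack seq data.length data.sum []).reverse := by
          conv_rhs => rw [hsplit]
          rw [show data.sum = 0 + data.sum by simp, psBackEq]
          simp
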